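-- pv_equiv track=rewrite | github.com/cbuquicchio/algorithms | algorithms/kosaraju.py | dfs_first_pass
-- ===== SOURCE A (Python) =====
-- def graph_get(graph, node):
--     try:
--         return graph[node]
--     except KeyError:
--         return []
--
-- def dfs_first_pass(graph, src, visited):
--     order = []
--     order_tracking = set([])
--     stack = []
--     stack.append(src)
--
--     while len(stack):
--         top = stack[-1]
--         edges = graph_get(graph, top)
--         visited.add(top)
--         trigger = True
--
--         for edge in edges:
--             if edge not in visited:
--                 stack.append(edge)
--                 trigger = False;
--                 break
--
--         if trigger:
--             order.append(stack.pop())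
--
--     return order
-- ===== SOURCE B (Python) =====
-- # B: same finish-order DFS, but each node keeps a cursor into its adjacency list
-- # that only moves forward, so edges already skipped are never re-scanned.
-- # Like A, it mutates `visited` in place (same final set of visited nodes).
-- def dfs_first_pass(graph, src, visited):
--     order = []
--     stack = [src]
--     visited.add(src)
--     ptr = {}
--     while stack:
--         top = stack[-1]
--         edges = graph.get(top, [])
--         i = ptr.get(top, 0)
--         n = len(edges)
--         while i < n and edges[i] in visited:
--             i += 1
--         if i < n:
--             nxt = edges[i]
--             ptr[top] = i + 1
--             visited.add(nxt)
--             stack.append(nxt)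
--         else:
--             ptr[top] = i
--             stack.pop()
--             order.append(top)
--     return order
-- ===== Notes on version B (the rewrite author's own statement) =====
-- stated objective: alternative
-- what changed: Replaces A's full re-scan of the top node's adjacency list on every loop iteration with a per-node forward-only cursor kept in a dict, so each edge position is skipped at most once overall.
import Mathlib
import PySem

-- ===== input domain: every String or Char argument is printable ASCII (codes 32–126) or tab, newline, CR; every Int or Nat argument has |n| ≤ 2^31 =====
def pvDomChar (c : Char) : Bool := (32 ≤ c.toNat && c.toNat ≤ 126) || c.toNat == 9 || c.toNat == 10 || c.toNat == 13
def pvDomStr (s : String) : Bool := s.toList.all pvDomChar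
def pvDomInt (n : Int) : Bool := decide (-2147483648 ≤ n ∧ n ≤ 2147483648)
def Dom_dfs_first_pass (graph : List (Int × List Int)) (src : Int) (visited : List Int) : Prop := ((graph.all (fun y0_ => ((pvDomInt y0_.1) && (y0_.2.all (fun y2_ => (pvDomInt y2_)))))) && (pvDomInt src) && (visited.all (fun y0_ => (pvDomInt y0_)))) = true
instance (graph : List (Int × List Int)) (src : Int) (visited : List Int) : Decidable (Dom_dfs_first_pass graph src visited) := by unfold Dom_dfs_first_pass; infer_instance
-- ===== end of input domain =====

-- B replaces A's full re-scan of the top node's adjacency list at every loop iteration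
-- by a per-node forward-only cursor kept in a dict; equivalence proved for the RETURN
-- value (in Python both mutate `visited` identically).
-- Both loops run one iteration per push/pop; `pvFuel` bounds that count (fuel only makes
-- the recursion total, it is never hit on any input: pushes ≤ 1 + total edge count).

-- ===== PORT A =====
-- graph_get: `graph[node]` with KeyError -> []
def graph_get (graph : List (Int × List Int)) (node : Int) : List Int :=
  (PySem.Dict.mk graph).getD node []

def pvFuel (graph : List (Int × List Int)) : Nat :=
  2 * (graph.foldl (fun a p => a + p.2.length) 0) + 4

-- the while-loop of A; stack head = Python stack[-1]; the for-with-break is find?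
def dfsA_loop (graph : List (Int × List Int)) : Nat → List Int → PySem.Set Int → List Int → List Int
  | 0, _, _, order => order
  | _ + 1, [], _, order => order
  | fuel + 1, top :: rest, visited, order =>
    match (graph_get graph top).find? (fun e => !(PySem.Set.contains (PySem.Set.add visited top) e)) with
    | some e => dfsA_loop graph fuel (e :: top :: rest) (PySem.Set.add visited top) order
    | none => dfsA_loop graph fuel rest (PySem.Set.add visited top) (order ++ [top])

def dfs_first_pass (graph : List (Int × List Int)) (src : Int) (visited : List Int) : List Int :=
  dfsA_loop graph (pvFuel graph) [src] visited []

-- ===== PORT B =====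
-- the inner `while i < n and edges[i] in visited: i += 1`
def bAdvance (edges : List Int) (visited : PySem.Set Int) (i : Nat) : Nat :=
  if h : i < edges.length then
    if PySem.Set.contains visited edges[i] then bAdvance edges visited (i + 1) else i
  else i
termination_by edges.length - i

-- the while-loop of B, with the per-node cursor dict `ptr`
def dfsB_loop (graph : List (Int × List Int)) : Nat → List Int → PySem.Set Int → PySem.Dict Int Nat → List Int → List Int
  | 0, _, _, _, order => order
  | _ + 1, [], _, _, order => order
  | fuel + 1, top :: rest, visited, ptr, order =>
    if h : bAdvance (graph_get graph top) visited (ptr.getD top 0) < (graph_get graph top).length then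
      dfsB_loop graph fuel
        ((graph_get graph top)[bAdvance (graph_get graph top) visited (ptr.getD top 0)] :: top :: rest)
        (PySem.Set.add visited (graph_get graph top)[bAdvance (graph_get graph top) visited (ptr.getD top 0)])
        (ptr.insert top (bAdvance (graph_get graph top) visited (ptr.getD top 0) + 1)) order
    else
      dfsB_loop graph fuel rest visited (ptr.insert top (bAdvance (graph_get graph top) visited (ptr.getD top 0))) (order ++ [top])

def dfs_first_pass_alt (graph : List (Int × List Int)) (src : Int) (visited : List Int) : List Int :=
  dfsB_loop graph (pvFuel graph) [src] (PySem.Set.add visited src) PySem.Dict.empty []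

-- ===== PRECONDITION & SPEC =====
def Spec_dfs_first_pass (graph : List (Int × List Int)) (src : Int) (visited : List Int) (out : List Int) : Prop := out = dfs_first_pass_alt graph src visited
instance (graph : List (Int × List Int)) (src : Int) (visited : List Int) (out : List Int) : Decidable (Spec_dfs_first_pass graph src visited out) := by unfold Spec_dfs_first_pass; infer_instance

-- ===== CLAIM (what is proved, stated in full; the proofs are below) =====
def Claim_equal_dfs_first_pass : Prop := ∀ (graph : List (Int × List Int)) (src : Int) (visited : List Int), Dom_dfs_first_pass graph src visited → Spec_dfs_first_pass graph src visited (dfs_first_pass graph src visited)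

-- ===== LEMMAS AND PROOFS =====

lemma bAdvance_le (edges : List Int) (v : PySem.Set Int) (i : Nat) : i ≤ bAdvance edges v i := by
  unfold bAdvance
  split
  · split
    · exact le_trans (Nat.le_succ i) (bAdvance_le edges v (i + 1))
    · exact le_refl i
  · exact le_refl i
termination_by edges.length - i

lemma bAdvance_prefix (edges : List Int) (v : PySem.Set Int) (i : Nat) :
    ∀ j, i ≤ j → j < bAdvance edges v i → ∀ (hj : j < edges.length), edges[j] ∈ v := by
  intro j hij hlt hj
  unfold bAdvance at hlt
  split at hlt
  · split at hlt
    · rcases Nat.eq_or_lt_of_le hij with rfl | hij'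
      · rename_i hc
        simpa [PySem.Set.contains] using hc
      · exact bAdvance_prefix edges v (i + 1) j hij' hlt hj
    · omega
  · omega
termination_by edges.length - i

lemma bAdvance_stop (edges : List Int) (v : PySem.Set Int) (i : Nat)
    (h : bAdvance edges v i < edges.length) : edges[bAdvance edges v i] ∉ v := by
  unfold bAdvance at h ⊢
  by_cases hl : i < edges.length
  · by_cases hc : PySem.Set.contains v edges[i] = true
    · simp only [dif_pos hl, if_pos hc] at h ⊢
      exact bAdvance_stop edges v (i + 1) h
    · simp only [dif_pos hl, if_neg hc] at h ⊢
      simpa [PySem.Set.contains] using hc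
  · simp only [dif_neg hl] at h
    omega
termination_by edges.length - i

-- A's full scan from 0 finds the same edge as B's cursor scan, given the prefix is visited
lemma find_eq_advance (edges : List Int) (v : PySem.Set Int) (i : Nat)
    (hpre : ∀ j < i, ∀ (hj : j < edges.length), edges[j] ∈ v) :
    edges.find? (fun e => !(PySem.Set.contains v e)) =
      if h : bAdvance edges v i < edges.length then some edges[bAdvance edges v i] else none := by
  have hall : ∀ j, j < bAdvance edges v i → ∀ (hj : j < edges.length), edges[j] ∈ v := by
    intro j hlt hj
    by_cases hji : j < i
    · exact hpre j hji hj
    · exact bAdvance_prefix edges v i j (Nat.le_of_not_lt hji) hlt hj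
  split
  · rename_i h
    rw [List.find?_eq_some_iff_getElem]
    refine ⟨by simpa [PySem.Set.contains] using bAdvance_stop edges v i h, bAdvance edges v i, h, rfl, ?_⟩
    intro j hj
    have := hall j hj (lt_trans hj h)
    simpa [PySem.Set.contains] using this
  · rename_i h
    rw [List.find?_eq_none]
    intro e he
    obtain ⟨j, hj, rfl⟩ := List.mem_iff_getElem.mp he
    have := hall j (lt_of_lt_of_le hj (Nat.le_of_not_lt h)) hj
    simpa [PySem.Set.contains] using this

-- lockstep simulation of the two while-loops: same stack, same output, B's visited set
-- is A's plus the current top, and every edge strictly before a cursor is visited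
lemma loop_eq (graph : List (Int × List Int)) :
    ∀ (fuel : Nat) (stack : List Int) (vA vB : PySem.Set Int) (ptr : PySem.Dict Int Nat) (order : List Int),
    (∀ top rest, stack = top :: rest →
      (∀ x : Int, x ∈ vB ↔ x ∈ vA ∨ x = top) ∧ (∀ x ∈ rest, x ∈ vA)) →
    (∀ w : Int, ∀ j < ptr.getD w 0, ∀ (hj : j < (graph_get graph w).length), (graph_get graph w)[j] ∈ vB) →
    dfsA_loop graph fuel stack vA order = dfsB_loop graph fuel stack vB ptr order := by
  intro fuel
  induction fuel with
  | zero => intro stack vA vB ptr order _ _; rfl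
  | succ fuel ih =>
    intro stack vA vB ptr order hrel hptr
    match stack with
    | [] => rfl
    | top :: rest =>
      obtain ⟨hmem, hbelow⟩ := hrel top rest rfl
      have hAB : ∀ x : Int, x ∈ PySem.Set.add vA top ↔ x ∈ vB := by
        intro x; rw [PySem.Set.mem_add, hmem]
      have hpred : (fun e => !(PySem.Set.contains (PySem.Set.add vA top) e)) =
          (fun e => !(PySem.Set.contains vB e)) := by
        funext e
        suffices h : PySem.Set.contains (PySem.Set.add vA top) e = PySem.Set.contains vB e by rw [h]
        rw [Bool.eq_iff_iff]
        constructor <;> intro hx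
        · have hm : e ∈ PySem.Set.add vA top := by simpa [PySem.Set.contains] using hx
          simpa [PySem.Set.contains] using (hAB e).mp hm
        · have hm : e ∈ vB := by simpa [PySem.Set.contains] using hx
          simpa [PySem.Set.contains] using (hAB e).mpr hm
      have hfind := find_eq_advance (graph_get graph top) vB (ptr.getD top 0)
        (fun j hj hjl => hptr top j hj hjl)
      simp only [dfsA_loop, dfsB_loop]
      rw [hpred, hfind]
      by_cases h : bAdvance (graph_get graph top) vB (ptr.getD top 0) < (graph_get graph top).length
      · -- push case
        rw [dif_pos h, dif_pos h]
        show dfsA_loop graph fuel _ (PySem.Set.add vA top) order = _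
        apply ih
        · intro t r ht
          injection ht with h1 h2
          subst h1; subst h2
          constructor
          · intro x
            rw [PySem.Set.mem_add, hAB]
          · intro x hx
            rw [PySem.Set.mem_add]
            rcases List.mem_cons.mp hx with rfl | hx
            · right; rfl
            · left; exact hbelow x hx
        · intro w j hj hjl
          rw [PySem.Set.mem_add]
          rw [PySem.Dict.getD_insert] at hj
          by_cases hw : w = top
          · subst hw
            rw [if_pos rfl] at hj
            rcases Nat.lt_succ_iff_lt_or_eq.mp hj with hj' | rfl
            · left
              by_cases hji : j < ptr.getD w 0
              · exact hptr w j hji hjl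
              · exact bAdvance_prefix _ vB _ j (Nat.le_of_not_lt hji) hj' hjl
            · right; rfl
          · rw [if_neg hw] at hj
            left; exact hptr w j hj hjl
      · -- pop case
        rw [dif_neg h, dif_neg h]
        show dfsA_loop graph fuel rest (PySem.Set.add vA top) (order ++ [top]) = _
        apply ih
        · intro t r ht
          subst ht
          have htA : t ∈ vA := hbelow t List.mem_cons_self
          constructor
          · intro x
            rw [hmem, PySem.Set.mem_add]
            constructor
            · rintro (hx | rfl)
              · exact Or.inl (Or.inl hx)
              · exact Or.inl (Or.inr rfl)
            · rintro ((hx | rfl) | rfl)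
              · exact Or.inl hx
              · exact Or.inr rfl
              · exact Or.inl htA
          · intro x hx
            rw [PySem.Set.mem_add]
            left; exact hbelow x (List.mem_cons_of_mem _ hx)
        · intro w j hj hjl
          rw [PySem.Dict.getD_insert] at hj
          by_cases hw : w = top
          · subst hw
            rw [if_pos rfl] at hj
            by_cases hji : j < ptr.getD w 0
            · exact hptr w j hji hjl
            · exact bAdvance_prefix _ vB _ j (Nat.le_of_not_lt hji) hj hjl
          · rw [if_neg hw] at hj
            exact hptr w j hj hjl

-- ===== VERDICT (by name: the statement is the Claim_ definition above) =====
theorem dfs_first_pass_spec : Claim_equal_dfs_first_pass := by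
  intro graph src visited _
  unfold Spec_dfs_first_pass dfs_first_pass dfs_first_pass_alt
  apply loop_eq
  · intro top rest h
    injection h with h1 h2; subst h1; subst h2
    exact ⟨fun x => by rw [PySem.Set.mem_add], fun x hx => absurd hx (List.not_mem_nil)⟩
  · intro w j hj
    rw [PySem.Dict.getD_empty] at hj
    omega
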